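-- pv_equiv track=rewrite | github.com/OSGeo/grass | scripts/v.dissolve/v.dissolve.py | match_columns_and_methods
-- ===== SOURCE A (Python) =====
-- def match_columns_and_methods(columns, methods):
--     """Return all combinations of columns and methods
--
--     If a column or a method is specified more than once, only the first occurrence
--     is used. This makes it suitable for interactive use which values convenience
--     over predictability.
--     """
--     new_columns = []
--     new_methods = []
--     used_columns = []
--     for column in columns:
--         if column in used_columns:
--             continue
--         used_columns.append(column)
--         used_methods = []
--         for method in methods:
--             if method in used_methods:
--                 continue
--             used_methods.append(method)
--             new_columns.append(column)
--             new_methods.append(method)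
--     return new_columns, new_methods
-- ===== SOURCE B (Python) =====
-- def match_columns_and_methods(columns, methods):
--     """Return all combinations of columns and methods (first occurrences only)."""
--     unique_cols = list(dict.fromkeys(columns))
--     unique_methods = list(dict.fromkeys(methods))
--     new_columns = [c for c in unique_cols for _m in unique_methods]
--     new_methods = [m for _c in unique_cols for m in unique_methods]
--     return new_columns, new_methods
-- ===== Notes on version B (the rewrite author's own statement) =====
-- stated objective: faster
-- what changed: B deduplicates columns and methods once up front (dict.fromkeys) and then emits the cross product with two flat comprehensions, instead of A's nested loops that re-deduplicate methods with a linear used-list membership scan on every iteration.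
import Mathlib
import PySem

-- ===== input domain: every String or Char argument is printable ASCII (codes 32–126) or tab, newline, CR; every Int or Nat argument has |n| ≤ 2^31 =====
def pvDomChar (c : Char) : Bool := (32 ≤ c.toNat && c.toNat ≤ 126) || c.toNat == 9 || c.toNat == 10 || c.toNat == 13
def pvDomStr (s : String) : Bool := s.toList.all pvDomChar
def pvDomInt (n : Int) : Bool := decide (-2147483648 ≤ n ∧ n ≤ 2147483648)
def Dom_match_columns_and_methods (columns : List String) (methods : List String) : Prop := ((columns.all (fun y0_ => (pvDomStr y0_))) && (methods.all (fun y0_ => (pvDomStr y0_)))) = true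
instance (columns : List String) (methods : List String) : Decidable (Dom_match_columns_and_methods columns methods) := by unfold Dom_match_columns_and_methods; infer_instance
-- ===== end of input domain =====

-- ===== PORT A =====
-- A: nested loops; state (new_columns, new_methods, used_columns); the inner loop
-- re-deduplicates methods with used_methods for every fresh column.
def match_columns_and_methods (columns : List String) (methods : List String) : List String × List String :=
  let r := columns.foldl
    (fun (st : List String × List String × List String) column =>
      if column ∈ st.2.2 then st
      else
        let inner := methods.foldl
          (fun (s : List String × List String × List String) method =>
            if method ∈ s.2.2 then s
            else (s.1 ++ [column], s.2.1 ++ [method], s.2.2 ++ [method]))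
          (st.1, st.2.1, ([] : List String))
        (inner.1, inner.2.1, st.2.2 ++ [column]))
    (([] : List String), ([] : List String), ([] : List String))
  (r.1, r.2.1)

-- ===== PORT B =====
-- B (one honest line): dedup both lists once up front (dict.fromkeys = PySem.List.dedup),
-- then emit the cross product with two flat comprehensions — simpler decomposition, no nested re-dedup.
def match_columns_and_methods_alt (columns : List String) (methods : List String) : List String × List String :=
  let uniqueCols := PySem.List.dedup columns
  let uniqueMethods := PySem.List.dedup methods
  (uniqueCols.flatMap (fun c => uniqueMethods.map (fun _m => c)),
   uniqueCols.flatMap (fun _c => uniqueMethods))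

-- ===== PRECONDITION & SPEC =====
def Spec_match_columns_and_methods (columns : List String) (methods : List String) (out : List String × List String) : Prop := out = match_columns_and_methods_alt columns methods
instance (columns : List String) (methods : List String) (out : List String × List String) : Decidable (Spec_match_columns_and_methods columns methods out) := by unfold Spec_match_columns_and_methods; infer_instance

-- ===== CLAIM (what is proved, stated in full; the proofs are below) =====
def Claim_equal_match_columns_and_methods : Prop := ∀ (columns : List String) (methods : List String), Dom_match_columns_and_methods columns methods → Spec_match_columns_and_methods columns methods (match_columns_and_methods columns methods)

-- ===== LEMMAS AND PROOFS =====

-- dedup of xs relative to an already-seen list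
def ddRel (seen : List String) : List String → List String
  | [] => []
  | x :: xs => if x ∈ seen then ddRel seen xs else x :: ddRel (seen ++ [x]) xs

theorem foldl_add_eq_ddRel (xs seen : List String) :
    xs.foldl PySem.Set.add seen = seen ++ ddRel seen xs := by
  induction xs generalizing seen with
  | nil => simp [ddRel]
  | cons x xs ih =>
    by_cases h : x ∈ seen
    · simp [ddRel, h, PySem.Set.add, PySem.Set.contains, ih]
    · simp [ddRel, h, PySem.Set.add, PySem.Set.contains, ih]

theorem dedup_eq_ddRel (xs : List String) : PySem.List.dedup xs = ddRel [] xs := by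
  have := foldl_add_eq_ddRel xs []
  simpa [PySem.List.dedup_eq_ofList, PySem.Set.ofList_eq_foldl] using this

theorem inner_fold (c : String) (ms : List String) (nc nm um : List String) :
    ms.foldl
      (fun (s : List String × List String × List String) method =>
        if method ∈ s.2.2 then s
        else (s.1 ++ [c], s.2.1 ++ [method], s.2.2 ++ [method]))
      (nc, nm, um)
    = (nc ++ (ddRel um ms).map (fun _ => c), nm ++ ddRel um ms, um ++ ddRel um ms) := by
  induction ms generalizing nc nm um with
  | nil => simp [ddRel]
  | cons m ms ih =>
    by_cases h : m ∈ um
    · simp [ddRel, h, ih]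
    · simp [ddRel, h, ih]

theorem outer_fold (cs ms : List String) (nc nm uc : List String) :
    cs.foldl
      (fun (st : List String × List String × List String) column =>
        if column ∈ st.2.2 then st
        else
          let inner := ms.foldl
            (fun (s : List String × List String × List String) method =>
              if method ∈ s.2.2 then s
              else (s.1 ++ [column], s.2.1 ++ [method], s.2.2 ++ [method]))
            (st.1, st.2.1, ([] : List String))
          (inner.1, inner.2.1, st.2.2 ++ [column]))
      (nc, nm, uc)
    = (nc ++ (ddRel uc cs).flatMap (fun c => (ddRel [] ms).map (fun _ => c)),
       nm ++ (ddRel uc cs).flatMap (fun _ => ddRel [] ms),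
       uc ++ ddRel uc cs) := by
  induction cs generalizing nc nm uc with
  | nil => simp [ddRel]
  | cons c cs ih =>
    by_cases h : c ∈ uc
    · simp [ddRel, h, ih]
    · rw [List.foldl_cons, if_neg h]
      show List.foldl _ (((ms.foldl _ (nc, nm, ([] : List String))).1 : List String), _, _) cs = _
      rw [inner_fold c ms nc nm []]
      rw [ih]
      simp [ddRel, h, List.append_assoc]

-- ===== VERDICT (by name: the statement is the Claim_ definition above) =====
theorem match_columns_and_methods_spec : Claim_equal_match_columns_and_methods := by
  intro columns methods _
  unfold Spec_match_columns_and_methods match_columns_and_methods match_columns_and_methods_alt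
  simp only [outer_fold, dedup_eq_ddRel]
  simp
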